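-- pv_equiv track=rewrite | github.com/reyn1920/online-production | rewritten/backend/content/vidscript_pro.py | _extract_personality_traits
-- ===== SOURCE A (Python) =====
-- def _extract_personality_traits(description: str) -> str:
--     """Extract personality traits from character description."""
--     description_lower = description.lower()
--     traits = []
--
--     # Common personality indicators
--     if any(
--         word in description_lower for word in ["confident", "bold", "assertive"]
--     ):
--         traits.append("confident")
--     if any(
--         word in description_lower for word in ["kind", "caring", "compassionate"]
--     ):
--         traits.append("empathetic")
--     if any(
--         word in description_lower
--         for word in ["creative", "artistic", "imaginative"]
--     ):
--         traits.append("creative")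
--     if any(
--         word in description_lower for word in ["determined", "persistent", "driven"]
--     ):
--         traits.append("determined")
--     if any(word in description_lower for word in ["funny", "humorous", "witty"]):
--         traits.append("humorous")
--
--     if traits:
--         return f"Characterized by being {', '.join(traits)}, with depth \
-- and authenticity that drives character development"
--     else:
--         return "Multi - dimensional with realistic strengths \
-- and flaws that create compelling character dynamics"
-- ===== SOURCE B (Python) =====
-- _KEYWORD_TO_TRAIT = [
--     ("confident", "confident"), ("bold", "confident"), ("assertive", "confident"),
--     ("kind", "empathetic"), ("caring", "empathetic"), ("compassionate", "empathetic"),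
--     ("creative", "creative"), ("artistic", "creative"), ("imaginative", "creative"),
--     ("determined", "determined"), ("persistent", "determined"), ("driven", "determined"),
--     ("funny", "humorous"), ("humorous", "humorous"), ("witty", "humorous"),
-- ]
-- _TRAIT_ORDER = ["confident", "empathetic", "creative", "determined", "humorous"]
--
--
-- def _extract_personality_traits(description: str) -> str:
--     """Single left-to-right scan of the text: at each position, record the trait of
--     every keyword starting there; then emit the found traits in canonical order."""
--     dl = description.lower()
--     found = set()
--     for i in range(len(dl)):
--         for keyword, trait in _KEYWORD_TO_TRAIT:
--             if dl.startswith(keyword, i):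
--                 found.add(trait)
--     traits = [t for t in _TRAIT_ORDER if t in found]
--     if traits:
--         return f"Characterized by being {', '.join(traits)}, with depth \
-- and authenticity that drives character development"
--     else:
--         return "Multi - dimensional with realistic strengths \
-- and flaws that create compelling character dynamics"
-- ===== Notes on version B (the rewrite author's own statement) =====
-- stated objective: alternative
-- what changed: Instead of five per-keyword-group substring searches over the text, B makes one left-to-right scan over the text, at each position checking which keyword starts there (a naive multi-pattern matcher) and accumulating the matched traits in a set, then emits the traits in the canonical order.
import Mathlib
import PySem

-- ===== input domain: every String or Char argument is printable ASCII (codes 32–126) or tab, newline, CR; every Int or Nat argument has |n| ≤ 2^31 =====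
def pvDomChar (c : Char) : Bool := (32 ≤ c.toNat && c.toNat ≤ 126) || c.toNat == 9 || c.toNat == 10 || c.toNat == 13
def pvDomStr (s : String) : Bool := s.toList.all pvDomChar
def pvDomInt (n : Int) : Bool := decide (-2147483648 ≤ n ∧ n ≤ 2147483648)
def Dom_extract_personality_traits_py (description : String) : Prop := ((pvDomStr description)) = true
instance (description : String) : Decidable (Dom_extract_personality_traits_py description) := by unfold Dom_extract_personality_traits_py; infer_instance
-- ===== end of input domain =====

-- B replaces A's five per-keyword-group substring searches by a single left-to-right scan
-- of the text that records, position by position, the trait of every keyword starting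
-- there in a set, and then emits the found traits in canonical order (objective: alternative).

-- ===== PORT A =====
def extract_personality_traits_py (description : String) : String :=
  let description_lower := PySem.Str.lower description
  let traits : List String := []
  let traits := if ["confident", "bold", "assertive"].any
      (fun word => PySem.Str.isIn word description_lower) then traits ++ ["confident"] else traits
  let traits := if ["kind", "caring", "compassionate"].any
      (fun word => PySem.Str.isIn word description_lower) then traits ++ ["empathetic"] else traits
  let traits := if ["creative", "artistic", "imaginative"].any
      (fun word => PySem.Str.isIn word description_lower) then traits ++ ["creative"] else traits
  let traits := if ["determined", "persistent", "driven"].any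
      (fun word => PySem.Str.isIn word description_lower) then traits ++ ["determined"] else traits
  let traits := if ["funny", "humorous", "witty"].any
      (fun word => PySem.Str.isIn word description_lower) then traits ++ ["humorous"] else traits
  if traits ≠ [] then
    "Characterized by being " ++ PySem.Str.join ", " traits
      ++ ", with depth and authenticity that drives character development"
  else
    "Multi - dimensional with realistic strengths and flaws that create compelling character dynamics"

-- ===== PORT B =====
def pvKeywordTrait : List (String × String) :=
  [("confident", "confident"), ("bold", "confident"), ("assertive", "confident"),
   ("kind", "empathetic"), ("caring", "empathetic"), ("compassionate", "empathetic"),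
   ("creative", "creative"), ("artistic", "creative"), ("imaginative", "creative"),
   ("determined", "determined"), ("persistent", "determined"), ("driven", "determined"),
   ("funny", "humorous"), ("humorous", "humorous"), ("witty", "humorous")]

def pvTraitOrder : List String :=
  ["confident", "empathetic", "creative", "determined", "humorous"]

-- the scanning loop of Source B: for i in range(len(dl)): for (kw, tr) in table: if dl.startswith(kw, i): found.add(tr)
def pvScan (dl : List Char) : PySem.Set String :=
  (List.range dl.length).foldl
    (fun s i => pvKeywordTrait.foldl
      (fun s p => if PySem.Chars.startswith (dl.drop i) p.1.toList
                  then PySem.Set.add s p.2 else s) s)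
    PySem.Set.empty

def extract_personality_traits_py_alt (description : String) : String :=
  let dl := PySem.Str.lower description
  let found := pvScan dl.toList
  let traits := pvTraitOrder.filter (fun t => PySem.Set.contains found t)
  if traits ≠ [] then
    "Characterized by being " ++ PySem.Str.join ", " traits
      ++ ", with depth and authenticity that drives character development"
  else
    "Multi - dimensional with realistic strengths and flaws that create compelling character dynamics"

-- ===== PRECONDITION & SPEC =====
def Spec_extract_personality_traits_py (description : String) (out : String) : Prop := out = extract_personality_traits_py_alt description
instance (description : String) (out : String) : Decidable (Spec_extract_personality_traits_py description out) := by unfold Spec_extract_personality_traits_py; infer_instance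

-- ===== CLAIM =====
def Claim_equal_extract_personality_traits_py : Prop := ∀ (description : String), Dom_extract_personality_traits_py description → Spec_extract_personality_traits_py description (extract_personality_traits_py description)

-- ===== LEMMAS AND PROOFS =====

theorem pv_mem_innerFold (rest : List Char) (tbl : List (String × String))
    (s : PySem.Set String) (t : String) :
    t ∈ tbl.foldl (fun s p => if PySem.Chars.startswith rest p.1.toList
                              then PySem.Set.add s p.2 else s) s
      ↔ t ∈ s ∨ ∃ p ∈ tbl, PySem.Chars.startswith rest p.1.toList = true ∧ p.2 = t := by
  induction tbl generalizing s with
  | nil => simp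
  | cons p tl ih =>
    simp only [List.foldl_cons, List.mem_cons]
    by_cases h : PySem.Chars.startswith rest p.1.toList = true
    · simp only [h, if_true, ih, PySem.Set.mem_add]
      constructor
      · rintro (⟨hs | ht⟩ | ⟨q, hq, hsq, htq⟩)
        · exact Or.inl hs
        · exact Or.inr ⟨p, Or.inl rfl, h, ht.symm⟩
        · exact Or.inr ⟨q, Or.inr hq, hsq, htq⟩
      · rintro (hs | ⟨q, (rfl | hq), hsq, htq⟩)
        · exact Or.inl (Or.inl hs)
        · exact Or.inl (Or.inr htq.symm)
        · exact Or.inr ⟨q, hq, hsq, htq⟩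
    · simp only [h, ih]
      constructor
      · rintro (hs | ⟨q, hq, hsq, htq⟩)
        · exact Or.inl hs
        · exact Or.inr ⟨q, Or.inr hq, hsq, htq⟩
      · rintro (hs | ⟨q, (rfl | hq), hsq, htq⟩)
        · exact Or.inl hs
        · exact absurd hsq h
        · exact Or.inr ⟨q, hq, hsq, htq⟩

theorem pv_mem_outerFold (dl : List Char) (idxs : List Nat)
    (s : PySem.Set String) (t : String) :
    t ∈ idxs.foldl (fun s i => pvKeywordTrait.foldl
        (fun s p => if PySem.Chars.startswith (dl.drop i) p.1.toList
                    then PySem.Set.add s p.2 else s) s) s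
      ↔ t ∈ s ∨ ∃ i ∈ idxs, ∃ p ∈ pvKeywordTrait,
          PySem.Chars.startswith (dl.drop i) p.1.toList = true ∧ p.2 = t := by
  induction idxs generalizing s with
  | nil => simp
  | cons i tl ih =>
    simp only [List.foldl_cons, ih, pv_mem_innerFold, List.mem_cons]
    constructor
    · rintro (⟨hs | ⟨p, hp, hsp, htp⟩⟩ | ⟨j, hj, p, hp, hsp, htp⟩)
      · exact Or.inl hs
      · exact Or.inr ⟨i, Or.inl rfl, p, hp, hsp, htp⟩
      · exact Or.inr ⟨j, Or.inr hj, p, hp, hsp, htp⟩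
    · rintro (hs | ⟨j, (rfl | hj), p, hp, hsp, htp⟩)
      · exact Or.inl (Or.inl hs)
      · exact Or.inl (Or.inr ⟨p, hp, hsp, htp⟩)
      · exact Or.inr ⟨j, hj, p, hp, hsp, htp⟩

theorem pv_exists_start_iff (dl kw : List Char) (hkw : kw ≠ []) :
    (∃ i ∈ List.range dl.length, PySem.Chars.startswith (dl.drop i) kw = true)
      ↔ PySem.Chars.isIn kw dl = true := by
  rw [← PySem.Chars.exists_prefix_drop_iff_isIn]
  constructor
  · rintro ⟨i, -, h⟩
    exact ⟨i, (PySem.Chars.startswith_iff _ _).1 h⟩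
  · rintro ⟨j, h⟩
    refine ⟨j, List.mem_range.2 ?_, (PySem.Chars.startswith_iff _ _).2 h⟩
    by_contra hj
    have hnil : dl.drop j = [] := List.drop_eq_nil_of_le (by omega)
    rw [hnil] at h
    exact hkw (List.prefix_nil.mp h)

theorem pv_contains_scan (dl : List Char) (t : String) :
    PySem.Set.contains (pvScan dl) t = true ↔
      ∃ p ∈ pvKeywordTrait, PySem.Chars.isIn p.1.toList dl = true ∧ p.2 = t := by
  have hkw : ∀ p ∈ pvKeywordTrait, p.1.toList ≠ [] := by decide
  rw [PySem.Set.contains_iff]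
  unfold pvScan
  rw [pv_mem_outerFold]
  constructor
  · rintro (hs | ⟨i, hi, p, hp, hsp, htp⟩)
    · simp [PySem.Set.empty] at hs
    · exact ⟨p, hp, (pv_exists_start_iff dl p.1.toList (hkw p hp)).1 ⟨i, hi, hsp⟩, htp⟩
  · rintro ⟨p, hp, hin, htp⟩
    obtain ⟨i, hi, hsp⟩ := (pv_exists_start_iff dl p.1.toList (hkw p hp)).2 hin
    exact Or.inr ⟨i, hi, p, hp, hsp, htp⟩

theorem pv_contains_confident (dl : List Char) :
    PySem.Set.contains (pvScan dl) "confident" =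
      (PySem.Chars.isIn "confident".toList dl || (PySem.Chars.isIn "bold".toList dl
        || PySem.Chars.isIn "assertive".toList dl)) := by
  rw [Bool.eq_iff_iff]
  simp only [pv_contains_scan, pvKeywordTrait, List.exists_mem_cons_iff,
    List.not_mem_nil, false_and, exists_false,or_false,
    Bool.or_eq_true]
  simp

theorem pv_contains_empathetic (dl : List Char) :
    PySem.Set.contains (pvScan dl) "empathetic" =
      (PySem.Chars.isIn "kind".toList dl || (PySem.Chars.isIn "caring".toList dl
        || PySem.Chars.isIn "compassionate".toList dl)) := by
  rw [Bool.eq_iff_iff]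
  simp only [pv_contains_scan, pvKeywordTrait, List.exists_mem_cons_iff,
    List.not_mem_nil, false_and, exists_false,or_false,
    Bool.or_eq_true]
  simp

theorem pv_contains_creative (dl : List Char) :
    PySem.Set.contains (pvScan dl) "creative" =
      (PySem.Chars.isIn "creative".toList dl || (PySem.Chars.isIn "artistic".toList dl
        || PySem.Chars.isIn "imaginative".toList dl)) := by
  rw [Bool.eq_iff_iff]
  simp only [pv_contains_scan, pvKeywordTrait, List.exists_mem_cons_iff,
    List.not_mem_nil, false_and, exists_false,or_false,
    Bool.or_eq_true]
  simp

theorem pv_contains_determined (dl : List Char) :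
    PySem.Set.contains (pvScan dl) "determined" =
      (PySem.Chars.isIn "determined".toList dl || (PySem.Chars.isIn "persistent".toList dl
        || PySem.Chars.isIn "driven".toList dl)) := by
  rw [Bool.eq_iff_iff]
  simp only [pv_contains_scan, pvKeywordTrait, List.exists_mem_cons_iff,
    List.not_mem_nil, false_and, exists_false,or_false,
    Bool.or_eq_true]
  simp

theorem pv_contains_humorous (dl : List Char) :
    PySem.Set.contains (pvScan dl) "humorous" =
      (PySem.Chars.isIn "funny".toList dl || (PySem.Chars.isIn "humorous".toList dl
        || PySem.Chars.isIn "witty".toList dl)) := by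
  rw [Bool.eq_iff_iff]
  simp only [pv_contains_scan, pvKeywordTrait, List.exists_mem_cons_iff,
    List.not_mem_nil, false_and, exists_false,or_false,
    Bool.or_eq_true]
  simp

-- ===== VERDICT =====
theorem extract_personality_traits_py_spec : Claim_equal_extract_personality_traits_py := by
  intro d _
  unfold Spec_extract_personality_traits_py extract_personality_traits_py
    extract_personality_traits_py_alt pvTraitOrder
  simp only [List.any_cons, List.any_nil, Bool.or_false, List.filter_cons, List.filter_nil,
    pv_contains_confident, pv_contains_empathetic, pv_contains_creative,
    pv_contains_determined, pv_contains_humorous, PySem.Str.isIn_eq]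
  by_cases h1 : (PySem.Chars.isIn "confident".toList (PySem.Str.lower d).toList
      || (PySem.Chars.isIn "bold".toList (PySem.Str.lower d).toList
      || PySem.Chars.isIn "assertive".toList (PySem.Str.lower d).toList)) = true <;>
  by_cases h2 : (PySem.Chars.isIn "kind".toList (PySem.Str.lower d).toList
      || (PySem.Chars.isIn "caring".toList (PySem.Str.lower d).toList
      || PySem.Chars.isIn "compassionate".toList (PySem.Str.lower d).toList)) = true <;>
  by_cases h3 : (PySem.Chars.isIn "creative".toList (PySem.Str.lower d).toList
      || (PySem.Chars.isIn "artistic".toList (PySem.Str.lower d).toList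
      || PySem.Chars.isIn "imaginative".toList (PySem.Str.lower d).toList)) = true <;>
  by_cases h4 : (PySem.Chars.isIn "determined".toList (PySem.Str.lower d).toList
      || (PySem.Chars.isIn "persistent".toList (PySem.Str.lower d).toList
      || PySem.Chars.isIn "driven".toList (PySem.Str.lower d).toList)) = true <;>
  by_cases h5 : (PySem.Chars.isIn "funny".toList (PySem.Str.lower d).toList
      || (PySem.Chars.isIn "humorous".toList (PySem.Str.lower d).toList
      || PySem.Chars.isIn "witty".toList (PySem.Str.lower d).toList)) = true <;>
  simp only [h1, h2, h3, h4, h5, Bool.not_eq_true] at * <;>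
  simp only [if_true, if_false, Bool.false_eq_true, List.nil_append, ne_eq,
    not_false_eq_true, List.cons_ne_nil, not_true_eq_false] <;>
  rfl
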